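-- pv_equiv track=rewrite | github.com/bra-fsn/passsage | src/passsage/proxy.py | _select_headers
-- ===== SOURCE A (Python) =====
-- def _select_headers(headers, names: list[str]) -> dict[str, str]:
--     if not headers or not names:
--         return {}
--     selected: dict[str, str] = {}
--     for name in names:
--         value = headers.get(name)
--         if value is not None:
--             selected[name] = value
--     return selected
-- ===== SOURCE B (Python) =====
-- def _select_headers(headers, names: list[str]) -> dict[str, str]:
--     # Inverted traversal: index each name by its first position, scan the
--     # header mapping once collecting matches, then sort the matches back
--     # into first-occurrence name order.
--     order = {}
--     for i, name in enumerate(names):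
--         order.setdefault(name, i)
--     hits = sorted(
--         ((order[k], k, v) for k, v in headers.items() if k in order),
--         key=lambda t: t[0],
--     )
--     return {k: v for _, k, v in hits}
-- ===== Notes on version B (the rewrite author's own statement) =====
-- stated objective: alternative
-- what changed: Inverts the traversal: instead of looping over the name list with per-name lookups into headers, B builds a first-position index of the names, scans the header mapping once collecting matching entries, and sorts the matches back into name order.
import Mathlib
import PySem

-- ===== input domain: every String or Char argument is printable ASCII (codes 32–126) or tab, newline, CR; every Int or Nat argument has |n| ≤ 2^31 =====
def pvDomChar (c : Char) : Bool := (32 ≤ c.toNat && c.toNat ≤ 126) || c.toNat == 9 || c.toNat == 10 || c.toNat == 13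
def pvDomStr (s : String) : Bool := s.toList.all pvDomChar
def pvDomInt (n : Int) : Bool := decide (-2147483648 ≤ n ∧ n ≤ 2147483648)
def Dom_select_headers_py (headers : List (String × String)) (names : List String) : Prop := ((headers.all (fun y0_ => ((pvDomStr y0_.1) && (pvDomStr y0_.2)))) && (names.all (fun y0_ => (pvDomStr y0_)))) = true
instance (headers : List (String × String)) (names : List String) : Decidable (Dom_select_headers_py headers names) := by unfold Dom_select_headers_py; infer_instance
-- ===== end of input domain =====

-- B inverts the traversal: it indexes the names by first position, scans the header mapping
-- once collecting matches, and sorts the matches back into name order (alternative).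

-- ===== PORT A =====
-- for name in names: value = headers.get(name); if value is not None: selected[name] = value
def select_headers_py (headers : List (String × String)) (names : List String) : List (String × String) :=
  if headers = [] ∨ names = [] then []
  else
    (names.foldl
      (fun (selected : PySem.Dict String String) name =>
        match (PySem.Dict.mk headers).get? name with
        | some v => selected.insert name v
        | none => selected)
      PySem.Dict.empty).items

-- ===== PORT B =====
-- order = {}; for i, name in enumerate(names): order.setdefault(name, i)
-- hits = sorted(((order[k], k, v) for k, v in headers.items() if k in order), key=lambda t: t[0])
-- return {k: v for _, k, v in hits}
-- ('k in order … order[k]' is rendered as one filterMap on the dict lookup)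
def select_headers_py_alt (headers : List (String × String)) (names : List String) : List (String × String) :=
  let order : PySem.Dict String Int :=
    (PySem.List.enumerate names 0).foldl (fun d p => d.setdefault p.2 p.1) PySem.Dict.empty
  let hits : List (Int × String × String) :=
    (PySem.Dict.mk headers).items.filterMap
      (fun p => (order.get? p.1).map (fun i => (i, p.1, p.2)))
  (PySem.Dict.ofList ((PySem.List.sorted hits (fun t => t.1)).map (fun t => (t.2.1, t.2.2)))).items

-- ===== PRECONDITION & SPEC =====
-- headers encodes a Python dict, whose keys are necessarily distinct; the association-list
-- encoding also admits duplicate keys, which no Python call can pass to _select_headers.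
def Pre_select_headers_py (headers : List (String × String)) (names : List String) : Prop :=
  (headers.map Prod.fst).Nodup
instance (headers : List (String × String)) (names : List String) : Decidable (Pre_select_headers_py headers names) := by unfold Pre_select_headers_py; infer_instance
def pvWitness_select_headers_py : (List (String × String)) × List String := ([("a", "1"), ("b", "2")], ["b", "c"])

def Spec_select_headers_py (headers : List (String × String)) (names : List String) (out : List (String × String)) : Prop := out = select_headers_py_alt headers names
instance (headers : List (String × String)) (names : List String) (out : List (String × String)) : Decidable (Spec_select_headers_py headers names out) := by unfold Spec_select_headers_py; infer_instance

-- ===== CLAIM (what is proved, stated in full; the proofs are below) =====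
def Claim_equal_select_headers_py : Prop := ∀ (headers : List (String × String)) (names : List String), Dom_select_headers_py headers names → Pre_select_headers_py headers names → Spec_select_headers_py headers names (select_headers_py headers names)

-- ===== LEMMAS AND PROOFS =====

-- the lookup a selected pair comes from
def fsel (headers : List (String × String)) (n : String) : Option (String × String) :=
  ((PySem.Dict.mk headers).get? n).map (fun v => (n, v))

-- first-occurrence index of a name (0 when absent; only used on members)
def idxI (names : List String) (n : String) : Int :=
  (((PySem.List.index? names n).getD 0 : Nat) : Int)

-- proof-side spec of A's loop: first-occurrence selection, given the keys already in the dict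
def goSpec (headers : List (String × String)) (seen : List String) : List String → List (String × String)
  | [] => []
  | n :: rest =>
    match (PySem.Dict.mk headers).get? n with
    | none => goSpec headers seen rest
    | some v => if n ∈ seen then goSpec headers seen rest else (n, v) :: goSpec headers (n :: seen) rest

theorem goSpec_congr (headers : List (String × String)) (ns : List String) :
    ∀ (s s' : List String), (∀ x, x ∈ s ↔ x ∈ s') → goSpec headers s ns = goSpec headers s' ns := by
  induction ns with
  | nil => intro s s' _; rfl
  | cons n rest ih =>
    intro s s' h
    simp only [goSpec]
    cases (PySem.Dict.mk headers).get? n with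
    | none => exact ih s s' h
    | some v =>
      dsimp only
      by_cases hn : n ∈ s
      · rw [if_pos hn, if_pos ((h n).mp hn)]; exact ih s s' h
      · rw [if_neg hn, if_neg (fun hc => hn ((h n).mpr hc))]
        have := ih (n :: s) (n :: s') (by intro x; simp [h x])
        rw [this]

-- an overwrite with the value already stored is the identity
theorem insert_of_mem_items_self {d : PySem.Dict String String} {n : String} {v : String}
    (hnd : d.keys.Nodup) (hmem : (n, v) ∈ d.items) : d.insert n v = d := by
  have hkn : n ∈ d.keys := PySem.Dict.mem_keys_of_mem_items _ hmem
  have hc : d.contains n = true := (PySem.Dict.contains_iff_mem_keys _ _).mpr hkn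
  have hget : d.get? n = some v := PySem.Dict.get?_of_mem_items _ hmem hnd
  apply PySem.Dict.ext
  rw [PySem.Dict.items_insert_of_contains d v hc]
  conv_rhs => rw [← List.map_id d.items]
  apply List.map_congr_left
  intro p hp
  by_cases hpn : p.1 = n
  · have hgp : d.get? p.1 = some p.2 := PySem.Dict.get?_of_mem_items _ (by exact hp) hnd
    rw [hpn, hget] at hgp
    have hv : v = p.2 := Option.some.inj hgp
    have hpe : p = (n, v) := by rw [hv, ← hpn]
    simp [hpe]
  · simp [hpn]

-- A's fold, characterised
theorem foldA (headers : List (String × String)) :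
    ∀ (ns : List String) (d : PySem.Dict String String),
      d.keys.Nodup → (∀ p ∈ d.items, (PySem.Dict.mk headers).get? p.1 = some p.2) →
      (ns.foldl
        (fun (selected : PySem.Dict String String) name =>
          match (PySem.Dict.mk headers).get? name with
          | some v => selected.insert name v
          | none => selected)
        d).items = d.items ++ goSpec headers d.keys ns := by
  intro ns
  induction ns with
  | nil => intro d _ _; simp [goSpec]
  | cons n rest ih =>
    intro d hnd hinv
    simp only [List.foldl_cons]
    cases hg : (PySem.Dict.mk headers).get? n with
    | none =>
      rw [ih d hnd hinv]
      simp [goSpec, hg]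
    | some v =>
      simp only [hg]
      by_cases hc : d.contains n = true
      · have hkn : n ∈ d.keys := (PySem.Dict.contains_iff_mem_keys _ _).mp hc
        have hsome : (d.get? n).isSome := by rw [← PySem.Dict.contains_eq_isSome_get?, hc]
        obtain ⟨w, hw⟩ := Option.isSome_iff_exists.mp hsome
        have hmemw : (n, w) ∈ d.items := PySem.Dict.mem_items_of_get?_eq_some _ hw
        have hwv : w = v := by
          have h2 := hinv (n, w) hmemw
          rw [hg] at h2
          exact (Option.some.inj h2).symm
        subst hwv
        rw [insert_of_mem_items_self hnd hmemw]
        rw [ih d hnd hinv]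
        simp [goSpec, hg, hkn]
      · have hcf : d.contains n = false := by simpa using hc
        have hkn : n ∉ d.keys := fun hm => hc ((PySem.Dict.contains_iff_mem_keys _ _).mpr hm)
        have hkeys : (d.insert n v).keys = d.keys ++ [n] :=
          PySem.Dict.keys_insert_of_not_contains d v hcf
        have hitems : (d.insert n v).items = d.items ++ [(n, v)] :=
          PySem.Dict.items_insert_of_not_contains d v hcf
        have hnd' : (d.insert n v).keys.Nodup := by
          rw [hkeys]
          simp only [List.nodup_append, List.nodup_singleton, true_and]
          refine ⟨hnd, ?_⟩
          intro a ha b hb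
          simp only [List.mem_singleton] at hb
          subst hb
          exact fun he => hkn (he ▸ ha)
        have hinv' : ∀ p ∈ (d.insert n v).items, (PySem.Dict.mk headers).get? p.1 = some p.2 := by
          rw [hitems]
          intro p hp
          rcases List.mem_append.mp hp with hp | hp
          · exact hinv p hp
          · simp only [List.mem_singleton] at hp
            subst hp
            exact hg
        rw [ih (d.insert n v) hnd' hinv', hitems, hkeys]
        have hcong := goSpec_congr headers rest (d.keys ++ [n]) (n :: d.keys)
          (by intro x; simp [or_comm])
        rw [hcong]
        simp [goSpec, hg, hkn]

-- dropping copies of a name whose lookup fails does not change the selection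
theorem filterMap_fsel_filter_ne (headers : List (String × String)) (n : String)
    (hn : (PySem.Dict.mk headers).get? n = none) (l : List String) :
    (l.filter (fun y => y != n)).filterMap (fsel headers) = l.filterMap (fsel headers) := by
  induction l with
  | nil => rfl
  | cons y l ih =>
    rw [List.filter_cons]
    by_cases hy : y = n
    · subst hy
      simp only [bne_self_eq_false, Bool.false_eq_true, if_false]
      have hf : fsel headers y = none := by simp [fsel, hn]
      rw [List.filterMap_cons, hf, ih]
    · have hb : (y != n) = true := by simp [hy]
      rw [hb, if_pos rfl, List.filterMap_cons, List.filterMap_cons, ih]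

-- A's selection, characterised as goSpec
theorem goSpec_eq (headers : List (String × String)) :
    ∀ (ns : List String) (seen : List String),
      goSpec headers seen ns =
        ((PySem.Set.ofList ns).filter (fun m => decide (m ∉ seen))).filterMap (fsel headers) := by
  intro ns
  induction ns with
  | nil => intro seen; simp [goSpec, PySem.Set.ofList_nil]
  | cons n rest ih =>
    intro seen
    rw [PySem.Set.ofList_cons]
    have hdis : PySem.Set.discard (PySem.Set.ofList rest) n =
        (PySem.Set.ofList rest).filter (fun y => y != n) := rfl
    rw [hdis]
    cases hg : (PySem.Dict.mk headers).get? n with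
    | none =>
      simp only [goSpec, hg]
      rw [ih seen]
      have hcomm : ((PySem.Set.ofList rest).filter (fun y => y != n)).filter
            (fun m => decide (m ∉ seen)) =
          ((PySem.Set.ofList rest).filter (fun m => decide (m ∉ seen))).filter
            (fun y => y != n) := by
        simp [List.filter_filter, Bool.and_comm]
      by_cases hs : n ∈ seen
      · rw [List.filter_cons]
        simp only [hs, not_true_eq_false, decide_false, Bool.false_eq_true, if_false]
        rw [hcomm, filterMap_fsel_filter_ne headers n hg]
      · rw [List.filter_cons]
        simp only [hs, not_false_eq_true, decide_true, if_true]
        rw [List.filterMap_cons]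
        have hf : fsel headers n = none := by simp [fsel, hg]
        rw [hf]
        rw [hcomm, filterMap_fsel_filter_ne headers n hg]
    | some v =>
      simp only [goSpec, hg]
      by_cases hs : n ∈ seen
      · simp only [hs, if_true]
        rw [ih seen]
        rw [List.filter_cons]
        simp only [hs, not_true_eq_false, decide_false, Bool.false_eq_true, if_false]
        congr 1
        rw [List.filter_filter]
        apply List.filter_congr
        intro m _
        by_cases hm : m ∈ seen
        · simp [hm]
        · have : m ≠ n := fun he => hm (he ▸ hs)
          simp [hm, this]
      · simp only [hs, if_false]
        rw [List.filter_cons]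
        simp only [hs, not_false_eq_true, decide_true, if_true]
        rw [List.filterMap_cons]
        have hf : fsel headers n = some (n, v) := by simp [fsel, hg]
        rw [hf]
        rw [ih (n :: seen)]
        congr 2
        rw [List.filter_filter]
        apply List.filter_congr
        intro m _
        by_cases hm : m ∈ seen
        · simp [hm]
        · by_cases hmn : m = n
          · simp [hmn]
          · simp [hm, hmn]

theorem map_fst_filterMap_fsel (headers : List (String × String)) (l : List String) :
    (l.filterMap (fsel headers)).map Prod.fst =
      l.filter (fun n => ((PySem.Dict.mk headers).get? n).isSome) := by
  induction l with
  | nil => rfl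
  | cons y l ih =>
    rw [List.filterMap_cons, List.filter_cons]
    cases hg : (PySem.Dict.mk headers).get? y with
    | none =>
      have hf : fsel headers y = none := by simp [fsel, hg]
      rw [hf]
      simp [ih]
    | some v =>
      have hf : fsel headers y = some (y, v) := by simp [fsel, hg]
      rw [hf]
      simp [ih]

theorem items_ofList_of_nodup (l : List (String × String)) (h : (l.map Prod.fst).Nodup) :
    (PySem.Dict.ofList l : PySem.Dict String String).items = l := by
  have hfold : (PySem.Dict.ofList l : PySem.Dict String String) =
      l.foldl (fun (d : PySem.Dict String String) p => d.insert p.1 p.2) PySem.Dict.empty := rfl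
  rw [hfold]
  have := PySem.Dict.items_foldl_insert_fresh l (k := Prod.fst) (v := Prod.snd)
    (d := PySem.Dict.empty) (by intro a _; rfl) h
  simpa using this

-- A equals the canonical selection: first-occurrence names, present in headers
theorem A_eq_canon (headers : List (String × String)) (names : List String) :
    select_headers_py headers names = (PySem.List.dedup names).filterMap (fsel headers) := by
  unfold select_headers_py
  by_cases h : headers = [] ∨ names = []
  · rw [if_pos h]
    rcases h with h | h
    · subst h
      have hnone : ∀ n : String, (PySem.Dict.mk ([] : List (String × String))).get? n = none :=
        fun _ => rfl
      have : (PySem.List.dedup names).filterMap (fsel []) = [] := by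
        simp [fsel, hnone]
      rw [this]
    · subst h
      rfl
  · rw [if_neg h]
    have hempty_keys : (PySem.Dict.empty : PySem.Dict String String).keys = [] := rfl
    have hempty_items : (PySem.Dict.empty : PySem.Dict String String).items = [] := rfl
    have h1 := foldA headers names PySem.Dict.empty
      (by rw [hempty_keys]; exact List.nodup_nil)
      (by rw [hempty_items]; intro p hp; cases hp)
    rw [h1, hempty_items, hempty_keys, List.nil_append]
    rw [goSpec_eq headers names []]
    have hfilt : (PySem.Set.ofList names).filter (fun m => decide (m ∉ ([] : List String))) =
        PySem.Set.ofList names := by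
      simp
    rw [hfilt]
    simp [PySem.List.dedup_eq_ofList]

-- ===== B-side lemmas =====

-- the order dict looks up the first-occurrence index
theorem orderGet (names : List String) :
    ∀ (s : Int) (d : PySem.Dict String Int) (x : String),
      ((PySem.List.enumerate names s).foldl (fun d p => d.setdefault p.2 p.1) d).get? x =
        if d.contains x then d.get? x
        else (PySem.List.index? names x).map (fun (k : Nat) => s + (k : Int)) := by
  induction names with
  | nil =>
    intro s d x
    rw [PySem.List.enumerate_nil]
    simp only [List.foldl_nil]
    by_cases h : d.contains x = true
    · rw [if_pos h]
    · have hf : d.contains x = false := by simpa using h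
      rw [if_neg (by simp [hf]), (PySem.Dict.get?_eq_none_iff_contains d x).mpr hf]
      rfl
  | cons n rest ih =>
    intro s d x
    rw [PySem.List.enumerate_cons]
    simp only [List.foldl_cons]
    rw [ih (s + 1) (d.setdefault n s) x]
    by_cases hx : x = n
    · subst hx
      have hcs : (d.setdefault x s).contains x = true := by
        rw [PySem.Dict.contains_setdefault]; simp
      rw [if_pos hcs, PySem.Dict.get?_setdefault_self, PySem.List.index?_cons_self]
      by_cases hc : d.contains x = true
      · have hsome : (d.get? x).isSome := by rw [← PySem.Dict.contains_eq_isSome_get?, hc]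
        obtain ⟨w, hw⟩ := Option.isSome_iff_exists.mp hsome
        rw [if_pos hc, hw]
        rfl
      · have hf : d.contains x = false := by simpa using hc
        rw [(PySem.Dict.get?_eq_none_iff_contains d x).mpr hf, if_neg (by simp [hf])]
        simp
    · have hcs : (d.setdefault n s).contains x = d.contains x := by
        rw [PySem.Dict.contains_setdefault]; simp [hx]
      rw [hcs, PySem.Dict.get?_setdefault_of_ne d s hx,
        PySem.List.index?_cons_of_ne rest (Ne.symm hx)]
      by_cases hc : d.contains x = true
      · rw [if_pos hc, if_pos hc]
      · rw [if_neg hc, if_neg hc]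
        cases hidx : PySem.List.index? rest x with
        | none => rfl
        | some k =>
          simp only [Option.map_some]
          congr 1
          push_cast
          ring

-- first-occurrence index of a member of the tail, seen from the cons
theorem idxI_cons_of_mem_ne (n x : String) (rest : List String)
    (hx : x ∈ rest) (hne : x ≠ n) : idxI (n :: rest) x = idxI rest x + 1 := by
  have hsome : (PySem.List.index? rest x).isSome :=
    (PySem.List.index?_isSome_iff rest x).mpr hx
  obtain ⟨k, hk⟩ := Option.isSome_iff_exists.mp hsome
  unfold idxI
  rw [PySem.List.index?_cons_of_ne rest (Ne.symm hne), hk]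
  simp

-- along the deduplicated name list the first-occurrence index strictly increases
theorem dedup_idx_pairwise :
    ∀ (names : List String),
      (PySem.List.dedup names).Pairwise (fun a b => idxI names a < idxI names b) := by
  intro names
  rw [PySem.List.dedup_eq_ofList]
  induction names with
  | nil => simp [PySem.Set.ofList_nil]
  | cons n rest ih =>
    rw [PySem.Set.ofList_cons]
    rw [List.pairwise_cons]
    constructor
    · intro b hb
      obtain ⟨hbs, hbn⟩ := (PySem.Set.mem_discard _ n b).mp hb
      have hbr : b ∈ rest := (PySem.Set.mem_ofList rest b).mp hbs
      have h1 : idxI (n :: rest) n = 0 := by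
        unfold idxI; rw [PySem.List.index?_cons_self]; rfl
      have h2 : idxI (n :: rest) b = idxI rest b + 1 := idxI_cons_of_mem_ne n b rest hbr hbn
      have h3 : 0 ≤ idxI rest b := by unfold idxI; positivity
      omega
    · have hdis : PySem.Set.discard (PySem.Set.ofList rest) n =
          (PySem.Set.ofList rest).filter (fun y => y != n) := rfl
      rw [hdis]
      have hsub := List.Pairwise.sublist (List.filter_sublist
        (p := fun y => y != n) (l := PySem.Set.ofList rest)) ih
      apply List.Pairwise.imp_of_mem _ hsub
      intro a b ha hb hab
      have han : a ≠ n := by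
        have := List.of_mem_filter ha; simpa using this
      have hbn : b ≠ n := by
        have := List.of_mem_filter hb; simpa using this
      have har : a ∈ rest := (PySem.Set.mem_ofList rest a).mp (List.mem_of_mem_filter ha)
      have hbr : b ∈ rest := (PySem.Set.mem_ofList rest b).mp (List.mem_of_mem_filter hb)
      rw [idxI_cons_of_mem_ne n a rest har han, idxI_cons_of_mem_ne n b rest hbr hbn]
      omega

-- B equals the same canonical selection (on distinct header keys)
theorem B_eq_canon (headers : List (String × String)) (names : List String)
    (hnd : (headers.map Prod.fst).Nodup) :
    select_headers_py_alt headers names = (PySem.List.dedup names).filterMap (fsel headers) := by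
  unfold select_headers_py_alt
  dsimp only
  have hitems : (PySem.Dict.mk headers).items = headers := rfl
  have hkeys : (PySem.Dict.mk headers).keys = headers.map Prod.fst := rfl
  have hknd : (PySem.Dict.mk headers).keys.Nodup := by rw [hkeys]; exact hnd
  -- the collection phase, with the order-dict lookups resolved
  have hhits :
      (PySem.Dict.mk headers).items.filterMap
        (fun p => (((PySem.List.enumerate names 0).foldl
            (fun d q => d.setdefault q.2 q.1) PySem.Dict.empty).get? p.1).map
          (fun i => (i, p.1, p.2))) =
      headers.filterMap
        (fun p => (PySem.List.index? names p.1).map (fun (k : Nat) => ((k : Int), p.1, p.2))) := by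
    rw [hitems]
    apply List.filterMap_congr
    intro p _
    rw [orderGet names 0 PySem.Dict.empty p.1, if_neg (by simp [PySem.Dict.contains_empty])]
    cases PySem.List.index? names p.1 with
    | none => rfl
    | some k => simp
  rw [hhits]
  -- the canonical list, tagged with indices
  set L : List (Int × String × String) :=
    (PySem.List.dedup names).filterMap
      (fun n => ((PySem.Dict.mk headers).get? n).map (fun v => (idxI names n, n, v))) with hL
  have hLnd : L.Nodup := by
    rw [hL]
    apply List.Nodup.filterMap _ (PySem.List.nodup_dedup names)
    intro a a' b hb hb'
    rw [Option.mem_def, Option.map_eq_some_iff] at hb hb'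
    obtain ⟨v, _, hv⟩ := hb
    obtain ⟨v', _, hv'⟩ := hb'
    have : a = b.2.1 := by rw [← hv]
    have h' : a' = b.2.1 := by rw [← hv']
    rw [this, h']
  have hHnd : (headers.filterMap
      (fun p => (PySem.List.index? names p.1).map (fun (k : Nat) => ((k : Int), p.1, p.2)))).Nodup := by
    apply List.Nodup.filterMap _ (List.Nodup.of_map Prod.fst hnd)
    intro a a' b hb hb'
    rw [Option.mem_def, Option.map_eq_some_iff] at hb hb'
    obtain ⟨k, _, hk⟩ := hb
    obtain ⟨k', _, hk'⟩ := hb'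
    have h1 : (a.1, a.2) = (b.2.1, b.2.2) := by rw [← hk]
    have h2 : (a'.1, a'.2) = (b.2.1, b.2.2) := by rw [← hk']
    have ha : a = (b.2.1, b.2.2) := by rw [← h1]
    have ha' : a' = (b.2.1, b.2.2) := by rw [← h2]
    rw [ha, ha']
  have hperm : L.Perm (headers.filterMap
      (fun p => (PySem.List.index? names p.1).map (fun (k : Nat) => ((k : Int), p.1, p.2)))) := by
    rw [List.perm_ext_iff_of_nodup hLnd hHnd]
    intro t
    rw [hL]
    simp only [List.mem_filterMap]
    constructor
    · rintro ⟨n, hn, hmap⟩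
      rw [Option.map_eq_some_iff] at hmap
      obtain ⟨v, hv, ht⟩ := hmap
      have hnm : n ∈ names := (PySem.List.mem_dedup names n).mp hn
      have hsome : (PySem.List.index? names n).isSome :=
        (PySem.List.index?_isSome_iff names n).mpr hnm
      obtain ⟨k, hk⟩ := Option.isSome_iff_exists.mp hsome
      refine ⟨(n, v), ?_, ?_⟩
      · rw [← hitems]
        exact PySem.Dict.mem_items_of_get?_eq_some _ hv
      · rw [hk]
        simp only [Option.map_some]
        rw [← ht]
        have : idxI names n = (k : Int) := by unfold idxI; rw [hk]; rfl
        rw [this]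
    · rintro ⟨p, hp, hmap⟩
      rw [Option.map_eq_some_iff] at hmap
      obtain ⟨k, hk, ht⟩ := hmap
      have hnm : p.1 ∈ names := by
        have : (PySem.List.index? names p.1).isSome := by rw [hk]; rfl
        exact (PySem.List.index?_isSome_iff names p.1).mp this
      refine ⟨p.1, (PySem.List.mem_dedup names p.1).mpr hnm, ?_⟩
      have hget : (PySem.Dict.mk headers).get? p.1 = some p.2 := by
        apply (PySem.Dict.get?_eq_some_iff_mem_items _ _ _ hknd).mpr
        rw [hitems]
        exact hp
      rw [hget]
      simp only [Option.map_some]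
      rw [← ht]
      have : idxI names p.1 = (k : Int) := by unfold idxI; rw [hk]; rfl
      rw [this]
  have hpair : L.Pairwise (fun a b => a.1 < b.1) := by
    rw [hL]
    rw [List.pairwise_filterMap]
    apply List.Pairwise.imp_of_mem _ (dedup_idx_pairwise names)
    intro a b _ _ hab t ht t' ht'
    rw [Option.map_eq_some_iff] at ht ht'
    obtain ⟨v, _, hv⟩ := ht
    obtain ⟨v', _, hv'⟩ := ht'
    rw [← hv, ← hv']
    exact hab
  rw [PySem.List.sorted_eq_of_perm_of_pairwise_lt _ L (fun t => t.1) hperm hpair]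
  -- strip the tags
  have hmap : L.map (fun t => (t.2.1, t.2.2)) = (PySem.List.dedup names).filterMap (fsel headers) := by
    rw [hL, List.map_filterMap]
    apply List.filterMap_congr
    intro n _
    cases hgn : (PySem.Dict.mk headers).get? n <;> simp [fsel, hgn]
  rw [hmap]
  apply items_ofList_of_nodup
  rw [map_fst_filterMap_fsel]
  exact List.Nodup.filter _ (by rw [PySem.List.dedup_eq_ofList]; exact PySem.Set.nodup_ofList names)

-- ===== VERDICT (by name: the statement is the Claim_ definition above) =====
theorem select_headers_py_spec : Claim_equal_select_headers_py := by
  intro headers names _ hpre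
  unfold Spec_select_headers_py
  rw [A_eq_canon headers names, B_eq_canon headers names hpre]
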